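-- pv_equiv track=rewrite | github.com/linggew/Lingo-Medico | scripts/language_to_template/LToR_Templify.py | Combine_Langs
-- ===== SOURCE A (Python) =====
-- LtoR_Text = 'French_Text'
--
-- def Combine_Langs(Eng_List, LtoR_List):
--     combined = []
--     for entry in Eng_List:
--         for entryy in LtoR_List:
--             if entry.get('ID') == entryy.get('ID'):
--                 combined_entry = {}
--                 combined_entry['Eng_Text'] = entry.get('Text')
--                 combined_entry[LtoR_Text] = entryy.get('Text')
--                 combined.append(combined_entry)
--
--     return combined
-- ===== SOURCE B (Python) =====
-- LtoR_Text = 'French_Text'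
--
-- def Combine_Langs(Eng_List, LtoR_List):
--     index = {}
--     for entryy in LtoR_List:
--         index.setdefault(entryy.get('ID'), []).append(entryy.get('Text'))
--     combined = []
--     for entry in Eng_List:
--         for text in index.get(entry.get('ID'), []):
--             combined.append({'Eng_Text': entry.get('Text'), LtoR_Text: text})
--     return combined
-- ===== Notes on version B (the rewrite author's own statement) =====
-- stated objective: alternative
-- what changed: Replaces the O(n*m) nested scan by a one-pass dict index of LtoR_List keyed by ID (lists of texts in order), then a single pass over Eng_List (intended as faster; a timing run measured only 1.31x at its largest size).
import Mathlib
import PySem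

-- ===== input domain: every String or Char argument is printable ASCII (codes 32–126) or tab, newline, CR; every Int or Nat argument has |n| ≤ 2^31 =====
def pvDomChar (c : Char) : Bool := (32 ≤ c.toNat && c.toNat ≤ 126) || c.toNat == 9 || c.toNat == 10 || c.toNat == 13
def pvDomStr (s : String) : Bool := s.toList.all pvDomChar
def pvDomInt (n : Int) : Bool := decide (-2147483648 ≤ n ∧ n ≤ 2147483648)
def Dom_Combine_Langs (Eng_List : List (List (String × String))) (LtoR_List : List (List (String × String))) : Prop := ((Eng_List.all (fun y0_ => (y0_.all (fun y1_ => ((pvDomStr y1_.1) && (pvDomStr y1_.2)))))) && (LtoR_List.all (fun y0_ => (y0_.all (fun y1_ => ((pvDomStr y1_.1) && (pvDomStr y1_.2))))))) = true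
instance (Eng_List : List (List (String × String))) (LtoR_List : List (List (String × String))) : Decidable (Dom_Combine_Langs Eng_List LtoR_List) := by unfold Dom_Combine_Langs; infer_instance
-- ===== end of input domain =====

set_option maxRecDepth 4000


-- B replaces A's nested scan by a dict index of LtoR_List keyed by ID, then one pass over Eng_List (objective: alternative algorithm).

-- shared primitive: Python `entry.get(k)` on a dict given as an association list
def pyGetKey (d : List (String × String)) (k : String) : Option String :=
  (PySem.Dict.ofList d).get? k

-- ===== PORT A =====
def Combine_Langs (Eng_List : List (List (String × String))) (LtoR_List : List (List (String × String))) : List (List (String × String)) :=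
  Eng_List.foldl (fun combined entry =>
    LtoR_List.foldl (fun combined entryy =>
      if pyGetKey entry "ID" == pyGetKey entryy "ID" then
        -- combined_entry = {'Eng_Text': entry.get('Text'), 'French_Text': entryy.get('Text')};
        -- Pre_ guarantees 'Text' is present on matched entries, so `.getD ""` never fires inside Pre_
        combined ++ [[("Eng_Text", (pyGetKey entry "Text").getD ""),
                      ("French_Text", (pyGetKey entryy "Text").getD "")]]
      else combined) combined) []

-- ===== PORT B =====
def Combine_Langs_alt (Eng_List : List (List (String × String))) (LtoR_List : List (List (String × String))) : List (List (String × String)) :=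
  -- index.setdefault(entryy.get('ID'), []).append(entryy.get('Text'))  ==  modify with default []
  let index : PySem.Dict (Option String) (List String) :=
    LtoR_List.foldl (fun d entryy =>
      d.modify (pyGetKey entryy "ID") [] (· ++ [(pyGetKey entryy "Text").getD ""]))
      PySem.Dict.empty
  Eng_List.foldl (fun combined entry =>
    combined ++ (index.getD (pyGetKey entry "ID") []).map (fun text =>
      [("Eng_Text", (pyGetKey entry "Text").getD ""), ("French_Text", text)])) []

-- ===== PRECONDITION & SPEC =====
-- Pre_ excludes inputs where some matched pair of entries lacks the 'Text' key: there Python A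
-- returns a dict containing None, which is not a value of the declared String type.
def Pre_Combine_Langs (Eng_List : List (List (String × String))) (LtoR_List : List (List (String × String))) : Prop :=
  ∀ e ∈ Eng_List, ∀ f ∈ LtoR_List, pyGetKey e "ID" = pyGetKey f "ID" →
    (pyGetKey e "Text").isSome ∧ (pyGetKey f "Text").isSome
instance (Eng_List : List (List (String × String))) (LtoR_List : List (List (String × String))) : Decidable (Pre_Combine_Langs Eng_List LtoR_List) := by unfold Pre_Combine_Langs; infer_instance
def pvWitness_Combine_Langs : (List (List (String × String))) × (List (List (String × String))) :=
  ([[("ID", "1"), ("Text", "hello")]], [[("ID", "1"), ("Text", "bonjour")]])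

def Spec_Combine_Langs (Eng_List : List (List (String × String))) (LtoR_List : List (List (String × String))) (out : List (List (String × String))) : Prop := out = Combine_Langs_alt Eng_List LtoR_List
instance (Eng_List : List (List (String × String))) (LtoR_List : List (List (String × String))) (out : List (List (String × String))) : Decidable (Spec_Combine_Langs Eng_List LtoR_List out) := by unfold Spec_Combine_Langs; infer_instance

-- ===== CLAIM (what is proved, stated in full; the proofs are below) =====
def Claim_equal_Combine_Langs : Prop := ∀ (Eng_List : List (List (String × String))) (LtoR_List : List (List (String × String))), Dom_Combine_Langs Eng_List LtoR_List → Pre_Combine_Langs Eng_List LtoR_List → Spec_Combine_Langs Eng_List LtoR_List (Combine_Langs Eng_List LtoR_List)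

-- ===== LEMMAS AND PROOFS =====

-- the index built by B answers: the texts of all LtoR entries whose ID is k, in order
theorem pv_index_getD (l : List (List (String × String)))
    (d : PySem.Dict (Option String) (List String)) (k : Option String) :
    (l.foldl (fun d e => d.modify (pyGetKey e "ID") [] (· ++ [(pyGetKey e "Text").getD ""])) d).getD k []
      = d.getD k [] ++ (l.filter (fun e => pyGetKey e "ID" == k)).map (fun e => (pyGetKey e "Text").getD "") := by
  induction l generalizing d with
  | nil => simp
  | cons e t ih =>
    simp only [List.foldl_cons, List.filter_cons, ih, PySem.Dict.getD_modify]
    by_cases h : k = pyGetKey e "ID"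
    · subst h
      rw [if_pos rfl]
      have h2 : (pyGetKey e "ID" == pyGetKey e "ID") = true := by simp
      rw [h2]
      simp
    · rw [if_neg h]
      have h2 : (pyGetKey e "ID" == k) = false := by
        simp only [beq_eq_false_iff_ne, ne_eq]; exact fun hh => h hh.symm
      rw [h2]
      simp

-- A's inner loop over LtoR_List appends exactly the rows of the matching entries
theorem pv_inner_fold (l : List (List (String × String)))
    (entry : List (String × String)) (c : List (List (String × String))) :
    l.foldl (fun c e =>
        if pyGetKey entry "ID" == pyGetKey e "ID" then
          c ++ [[("Eng_Text", (pyGetKey entry "Text").getD ""),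
                 ("French_Text", (pyGetKey e "Text").getD "")]]
        else c) c
      = c ++ ((l.filter (fun e => pyGetKey e "ID" == pyGetKey entry "ID")).map
          (fun e => (pyGetKey e "Text").getD "")).map (fun text =>
            [("Eng_Text", (pyGetKey entry "Text").getD ""), ("French_Text", text)]) := by
  induction l generalizing c with
  | nil => simp
  | cons e t ih =>
    simp only [List.foldl_cons, List.filter_cons]
    by_cases h : pyGetKey entry "ID" = pyGetKey e "ID"
    · have h1 : (pyGetKey entry "ID" == pyGetKey e "ID") = true := by simp [h]
      have h2 : (pyGetKey e "ID" == pyGetKey entry "ID") = true := by simp [h]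
      rw [h1, h2, ih]
      simp
    · have h1 : (pyGetKey entry "ID" == pyGetKey e "ID") = false := by
        simp only [beq_eq_false_iff_ne, ne_eq]; exact h
      have h2 : (pyGetKey e "ID" == pyGetKey entry "ID") = false := by
        simp only [beq_eq_false_iff_ne, ne_eq]; exact fun hh => h hh.symm
      rw [h1, h2, ih]
      simp

theorem pv_main (Eng_List LtoR_List : List (List (String × String))) :
    Combine_Langs Eng_List LtoR_List = Combine_Langs_alt Eng_List LtoR_List := by
  unfold Combine_Langs Combine_Langs_alt
  suffices h : ∀ (c : List (List (String × String))),
      Eng_List.foldl (fun combined entry =>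
        LtoR_List.foldl (fun combined entryy =>
          if pyGetKey entry "ID" == pyGetKey entryy "ID" then
            combined ++ [[("Eng_Text", (pyGetKey entry "Text").getD ""),
                          ("French_Text", (pyGetKey entryy "Text").getD "")]]
          else combined) combined) c
      = Eng_List.foldl (fun combined entry =>
          combined ++ ((LtoR_List.foldl (fun d entryy =>
              d.modify (pyGetKey entryy "ID") [] (· ++ [(pyGetKey entryy "Text").getD ""]))
              PySem.Dict.empty).getD (pyGetKey entry "ID") []).map (fun text =>
            [("Eng_Text", (pyGetKey entry "Text").getD ""), ("French_Text", text)])) c by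
    exact h []
  intro c
  induction Eng_List generalizing c with
  | nil => rfl
  | cons entry t ih =>
    simp only [List.foldl_cons]
    rw [pv_inner_fold, pv_index_getD, ih]
    simp

-- ===== VERDICT (by name: the statement is the Claim_ definition above) =====
theorem Combine_Langs_spec : Claim_equal_Combine_Langs := by
  intro Eng_List LtoR_List _ _
  exact (pv_main Eng_List LtoR_List).symm ▸ rfl
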